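-- pv_equiv track=rewrite | github.com/harshad-inarkar/Study | leetcode_scripts/zigzag_triples.py | zigzag_triples
-- ===== SOURCE A (Python) =====
-- def zigzag_triples(numbers):
--
--     """
--     Given an array of integers numbers, returns an array of length len(numbers) - 2,
--     where the ith element is 1 if (numbers[i], numbers[i+1], numbers[i+2]) is a zigzag triple,
--     and 0 otherwise.
--     """
--     n = len(numbers)
--     if n < 3:
--         return []
--
--     return [
--         1 if (numbers[i] < numbers[i+1] > numbers[i+2]) or (numbers[i] > numbers[i+1] < numbers[i+2]) else 0
--         for i in range(n - 2)
--     ]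
-- ===== SOURCE B (Python) =====
-- def zigzag_triples(numbers):
--     # sign of each consecutive step, then a triple is zigzag iff adjacent signs have product < 0
--     signs = [0 if b == a else (1 if a < b else -1) for a, b in zip(numbers, numbers[1:])]
--     return [1 if s * t < 0 else 0 for s, t in zip(signs, signs[1:])]
-- ===== Notes on version B (the rewrite author's own statement) =====
-- stated objective: alternative
-- what changed: B replaces the direct triple-comparison comprehension by a two-pass sign-table scheme: first a list of consecutive-difference signs, then adjacent sign products decide each triple; no explicit length guard is needed.
import Mathlib
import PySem

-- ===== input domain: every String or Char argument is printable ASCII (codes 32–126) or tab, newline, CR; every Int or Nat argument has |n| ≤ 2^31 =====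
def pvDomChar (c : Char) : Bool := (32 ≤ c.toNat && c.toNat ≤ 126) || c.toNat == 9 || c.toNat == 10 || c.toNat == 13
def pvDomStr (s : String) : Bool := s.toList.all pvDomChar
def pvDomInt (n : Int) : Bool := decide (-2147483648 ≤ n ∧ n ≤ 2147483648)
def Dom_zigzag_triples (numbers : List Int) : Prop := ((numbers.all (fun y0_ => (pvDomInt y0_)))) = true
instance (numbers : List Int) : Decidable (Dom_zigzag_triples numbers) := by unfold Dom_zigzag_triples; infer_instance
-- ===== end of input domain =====

-- B replaces the direct triple-comparison comprehension by a two-pass sign-table scan (alternative decomposition, same cost).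


-- ===== PORT A =====
-- pyGetD with default 0 is exact here: every index used lies in range.
def zigzag_triples (numbers : List Int) : List Int :=
  let n : Int := numbers.length
  if n < 3 then []
  else
    (PySem.List.pyRange 0 (n - 2) 1).map (fun i =>
      if (PySem.List.pyGetD numbers i 0 < PySem.List.pyGetD numbers (i+1) 0 ∧
          PySem.List.pyGetD numbers (i+2) 0 < PySem.List.pyGetD numbers (i+1) 0) ∨
         (PySem.List.pyGetD numbers (i+1) 0 < PySem.List.pyGetD numbers i 0 ∧
          PySem.List.pyGetD numbers (i+1) 0 < PySem.List.pyGetD numbers (i+2) 0)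
      then 1 else 0)

-- ===== PORT B =====
def pvSign (a b : Int) : Int := if b = a then 0 else if a < b then 1 else -1

def zigzag_triples_alt (numbers : List Int) : List Int :=
  let signs := List.zipWith pvSign numbers numbers.tail
  List.zipWith (fun s t => if s * t < 0 then 1 else 0) signs signs.tail

-- ===== PRECONDITION & SPEC =====
def Spec_zigzag_triples (numbers : List Int) (out : List Int) : Prop := out = zigzag_triples_alt numbers
instance (numbers : List Int) (out : List Int) : Decidable (Spec_zigzag_triples numbers out) := by unfold Spec_zigzag_triples; infer_instance

-- ===== CLAIM (what is proved, stated in full; the proofs are below) =====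
def Claim_equal_zigzag_triples : Prop := ∀ (numbers : List Int), Dom_zigzag_triples numbers → Spec_zigzag_triples numbers (zigzag_triples numbers)

-- ===== LEMMAS AND PROOFS =====

-- ===== VERDICT (by name: the statement is the Claim_ definition above) =====
lemma alt_length (xs : List Int) : (zigzag_triples_alt xs).length = xs.length - 2 := by
  simp [zigzag_triples_alt]; omega

lemma alt_getElem (xs : List Int) (i : Nat) (h : i < (zigzag_triples_alt xs).length) :
    (zigzag_triples_alt xs)[i] =
      if pvSign (xs[i]'(by have := alt_length xs; omega)) (xs[i+1]'(by have := alt_length xs; omega)) *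
         pvSign (xs[i+1]'(by have := alt_length xs; omega)) (xs[i+2]'(by have := alt_length xs; omega)) < 0
      then 1 else 0 := by
  simp [zigzag_triples_alt, List.getElem_zipWith, List.getElem_tail]

lemma triple_eq_sign (a b c : Int) :
    (if (a < b ∧ c < b) ∨ (b < a ∧ b < c) then (1:Int) else 0) =
      (if pvSign a b * pvSign b c < 0 then (1:Int) else 0) := by
  unfold pvSign
  split_ifs <;> omega

theorem zigzag_triples_spec : Claim_equal_zigzag_triples := by
  intro xs _
  unfold Spec_zigzag_triples zigzag_triples
  by_cases h : (xs.length : Int) < 3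
  · simp only [h, if_true]
    symm
    rw [← List.length_eq_zero_iff, alt_length]
    omega
  · simp only [h, if_false]
    apply List.ext_getElem
    · simp [alt_length, PySem.List.length_pyRange_one]; omega
    · intro i h1 h2
      rw [List.getElem_map, PySem.List.getElem_pyRange_one, alt_getElem]
      have hlen : i + 2 < xs.length := by
        have := alt_length xs; omega
      have e0 : (0:Int) + (i:Int) = ((i:Nat):Int) := zero_add _
      have e1 : ((i:Nat):Int) + 1 = ((i+1:Nat):Int) := by push_cast; ring
      have e2 : ((i:Nat):Int) + 2 = ((i+2:Nat):Int) := by push_cast; ring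
      rw [e0, e1, e2, PySem.List.pyGetD_natCast, PySem.List.pyGetD_natCast,
        PySem.List.pyGetD_natCast,
        List.getD_eq_getElem xs 0 (by omega), List.getD_eq_getElem xs 0 (by omega),
        List.getD_eq_getElem xs 0 (by omega)]
      exact triple_eq_sign _ _ _
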